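-- pv_equiv track=rewrite | github.com/bolo-web/CCD | ccd.py | _init_in_think_block
-- ===== SOURCE A (Python) =====
-- from typing import Any, Dict, List, Tuple
--
-- def _init_in_think_block(prompt_token_ids: List[int], think_start_id: int, think_end_id: int) -> bool:
--     """Init think state from prompt tokens."""
--     last_start = -1
--     last_end = -1
--     for i, tid in enumerate(prompt_token_ids):
--         if tid == think_start_id:
--             last_start = i
--         elif tid == think_end_id:
--             last_end = i
--     return (last_start != -1) and (last_end < last_start)
-- ===== SOURCE B (Python) =====
-- from typing import List
--
-- def _init_in_think_block(prompt_token_ids: List[int], think_start_id: int, think_end_id: int) -> bool: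
--     """Init think state from prompt tokens: scan backwards, stop at the last sentinel."""
--     for tid in reversed(prompt_token_ids):
--         if tid == think_start_id:
--             return True
--         if tid == think_end_id:
--             return False
--     return False
-- ===== Notes on version B (the rewrite author's own statement) =====
-- stated objective: simpler
-- what changed: Replaces the full forward scan that tracks two last-seen indices with a reverse scan that early-exits at the first (i.e. last) sentinel token, returning True on think_start_id and False on think_end_id.
import Mathlib
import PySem

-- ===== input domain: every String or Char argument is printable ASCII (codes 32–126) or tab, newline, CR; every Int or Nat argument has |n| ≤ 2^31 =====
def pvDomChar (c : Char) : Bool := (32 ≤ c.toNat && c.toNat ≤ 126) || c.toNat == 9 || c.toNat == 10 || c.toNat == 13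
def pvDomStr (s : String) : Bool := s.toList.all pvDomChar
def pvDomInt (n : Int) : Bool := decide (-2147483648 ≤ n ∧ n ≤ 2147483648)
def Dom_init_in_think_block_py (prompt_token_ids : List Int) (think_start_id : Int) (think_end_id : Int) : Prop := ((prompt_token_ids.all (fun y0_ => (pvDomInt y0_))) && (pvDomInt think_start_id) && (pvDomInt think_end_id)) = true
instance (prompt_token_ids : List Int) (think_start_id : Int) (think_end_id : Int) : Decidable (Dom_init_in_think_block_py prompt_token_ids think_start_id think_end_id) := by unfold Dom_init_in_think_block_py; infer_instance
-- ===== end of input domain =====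

-- B replaces A's full forward scan tracking two last-seen indices by a reverse scan that early-exits at the last sentinel token (simpler decomposition, same return value).


-- ===== PORT A =====
-- A: forward pass keeping the running index and the last-seen index of each sentinel.
def init_in_think_block_py (prompt_token_ids : List Int) (think_start_id : Int) (think_end_id : Int) : Bool :=
  let st := prompt_token_ids.foldl
    (fun (st : Int × Int × Int) tid =>
      let (i, last_start, last_end) := st
      if tid == think_start_id then (i + 1, i, last_end)
      else if tid == think_end_id then (i + 1, last_start, i)
      else (i + 1, last_start, last_end))
    (0, -1, -1)
  st.2.1 != -1 && decide (st.2.2 < st.2.1)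

-- ===== PORT B =====
-- B: reverse scan, early exit at the first (i.e. last) sentinel; start checked first.
def pvRevScan (think_start_id think_end_id : Int) : List Int → Bool
  | [] => false
  | tid :: rest =>
    if tid == think_start_id then true
    else if tid == think_end_id then false
    else pvRevScan think_start_id think_end_id rest

def init_in_think_block_py_alt (prompt_token_ids : List Int) (think_start_id : Int) (think_end_id : Int) : Bool :=
  pvRevScan think_start_id think_end_id prompt_token_ids.reverse

-- ===== PRECONDITION & SPEC =====
def Spec_init_in_think_block_py (prompt_token_ids : List Int) (think_start_id : Int) (think_end_id : Int) (out : Bool) : Prop := out = init_in_think_block_py_alt prompt_token_ids think_start_id think_end_id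
instance (prompt_token_ids : List Int) (think_start_id : Int) (think_end_id : Int) (out : Bool) : Decidable (Spec_init_in_think_block_py prompt_token_ids think_start_id think_end_id out) := by unfold Spec_init_in_think_block_py; infer_instance

-- ===== CLAIM (what is proved, stated in full; the proofs are below) =====
def Claim_equal_init_in_think_block_py : Prop := ∀ (prompt_token_ids : List Int) (think_start_id : Int) (think_end_id : Int), Dom_init_in_think_block_py prompt_token_ids think_start_id think_end_id → Spec_init_in_think_block_py prompt_token_ids think_start_id think_end_id (init_in_think_block_py prompt_token_ids think_start_id think_end_id)

-- ===== LEMMAS AND PROOFS =====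

def pvFoldA (s e : Int) (xs : List Int) : Int × Int × Int :=
  xs.foldl
    (fun (st : Int × Int × Int) tid =>
      if tid == s then (st.1 + 1, st.1, st.2.2)
      else if tid == e then (st.1 + 1, st.2.1, st.1)
      else (st.1 + 1, st.2.1, st.2.2))
    (0, -1, -1)

lemma pvA_eq (xs : List Int) (s e : Int) :
    init_in_think_block_py xs s e
      = ((pvFoldA s e xs).2.1 != -1 && decide ((pvFoldA s e xs).2.2 < (pvFoldA s e xs).2.1)) := rfl

lemma pvFoldA_append (s e : Int) (ys : List Int) (x : Int) :
    pvFoldA s e (ys ++ [x]) =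
      (if x == s then ((pvFoldA s e ys).1 + 1, (pvFoldA s e ys).1, (pvFoldA s e ys).2.2)
       else if x == e then ((pvFoldA s e ys).1 + 1, (pvFoldA s e ys).2.1, (pvFoldA s e ys).1)
       else ((pvFoldA s e ys).1 + 1, (pvFoldA s e ys).2.1, (pvFoldA s e ys).2.2)) := by
  simp [pvFoldA, List.foldl_append]

lemma pvFoldA_inv (s e : Int) (xs : List Int) :
    (pvFoldA s e xs).1 = xs.length ∧ (pvFoldA s e xs).2.1 < xs.length ∧
      (pvFoldA s e xs).2.2 < xs.length ∧ -1 ≤ (pvFoldA s e xs).2.1 ∧ -1 ≤ (pvFoldA s e xs).2.2 := by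
  induction xs using List.reverseRecOn with
  | nil => simp [pvFoldA]
  | append_singleton ys x ih =>
    rcases ih with ⟨h1, h2, h3, h4, h5⟩
    rw [pvFoldA_append]
    have hl : (ys ++ [x]).length = ys.length + 1 := by simp
    rw [hl]
    split_ifs <;> simp only [h1] <;> omega

lemma pv_main (xs : List Int) (s e : Int) :
    init_in_think_block_py xs s e = init_in_think_block_py_alt xs s e := by
  unfold init_in_think_block_py_alt
  induction xs using List.reverseRecOn with
  | nil => rfl
  | append_singleton ys x ih =>
    obtain ⟨h1, h2, h3, h4, h5⟩ := pvFoldA_inv s e ys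
    rw [pvA_eq, pvFoldA_append, List.reverse_append]
    rw [pvA_eq] at ih
    simp only [List.reverse_cons, List.reverse_nil, List.nil_append, List.cons_append,
      pvRevScan]
    by_cases hs : x == s
    · simp only [hs, if_true, h1]
      simp only [Bool.and_eq_true, bne_iff_ne, ne_eq, decide_eq_true_eq]
      exact ⟨by omega, by omega⟩
    · by_cases he : x == e
      · simp [hs, he, h1]
        omega
      · simp [hs, he]
        exact ih

-- ===== VERDICT (by name: the statement is the Claim_ definition above) =====
theorem init_in_think_block_py_spec : Claim_equal_init_in_think_block_py := by
  intro xs s e _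
  unfold Spec_init_in_think_block_py
  exact pv_main xs s e
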